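-- pv_equiv track=rewrite | github.com/Saimol-Uta/Codigo | index.py | verificar_crc
-- ===== SOURCE A (Python) =====
-- POLINOMIO_CRC = 0b100000111
--
-- def verificar_crc(datos_con_crc: int, poly: int = POLINOMIO_CRC, data_bits: int = 8) -> bool:
--     """Verifica si un paquete (data_bits + degree) tiene error usando `poly`."""
--     degree = poly.bit_length() - 1
--     dividendo = datos_con_crc
--     shift = data_bits - 1
--     divisor = poly << shift
--     for i in range(data_bits):
--         if (dividendo >> (data_bits + degree - 1 - i)) & 1:
--             dividendo ^= (divisor >> i)
--     return (dividendo & ((1 << degree) - 1)) == 0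
-- ===== SOURCE B (Python) =====
-- POLINOMIO_CRC = 0b100000111
--
-- def verificar_crc(datos_con_crc: int, poly: int = POLINOMIO_CRC, data_bits: int = 8) -> bool:
--     """Shift-register CRC check: a degree-wide masked remainder register consumes
--     one message bit per step instead of XORing full-width shifted divisors."""
--     degree = poly.bit_length() - 1
--     mask = (1 << degree) - 1
--     rem = (datos_con_crc >> data_bits) & mask
--     for p in range(data_bits - 1, -1, -1):
--         rem = (rem << 1) | ((datos_con_crc >> p) & 1)
--         if (rem >> degree) & 1:
--             rem ^= poly
--         rem &= mask
--     return rem == 0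
-- ===== Notes on version B (the rewrite author's own statement) =====
-- stated objective: alternative
-- what changed: B replaces A's full-width long division (XORing a pre-shifted divisor into the whole packet integer) by a shift-register CRC: a degree-wide masked remainder register that consumes one message bit per step, so all arithmetic is on degree+1-bit values instead of (data_bits+degree)-bit ones.
-- crash fix: When data_bits = 0 (and poly != 0) A raises ValueError from a negative shift ('poly << (data_bits-1)') while B returns whether the degree-wide field of the packet is a multiple-free remainder, i.e. rem == 0. — e.g. on verificar_crc(5, 7, 0): A raises ValueError, B returns false
import Mathlib
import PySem

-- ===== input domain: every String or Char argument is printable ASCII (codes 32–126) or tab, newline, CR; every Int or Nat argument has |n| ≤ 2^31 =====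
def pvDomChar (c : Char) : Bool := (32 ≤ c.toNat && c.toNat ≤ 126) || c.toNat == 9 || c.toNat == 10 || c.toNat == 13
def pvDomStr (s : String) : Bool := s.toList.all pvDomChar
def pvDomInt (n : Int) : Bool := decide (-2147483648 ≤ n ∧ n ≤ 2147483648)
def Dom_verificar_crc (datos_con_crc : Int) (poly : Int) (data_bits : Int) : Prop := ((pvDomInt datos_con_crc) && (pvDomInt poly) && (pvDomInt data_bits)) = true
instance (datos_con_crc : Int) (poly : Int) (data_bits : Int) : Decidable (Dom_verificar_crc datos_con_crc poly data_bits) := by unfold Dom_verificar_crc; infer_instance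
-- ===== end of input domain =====

-- B replaces A's full-width long-division XOR loop by a degree-wide masked shift-register
-- that consumes one message bit per step (alternative decomposition, same cost class).


-- ===== PORT A =====
def verificar_crc (datos_con_crc : Int) (poly : Int) (data_bits : Int) : Bool :=
  let degree : Int := (PySem.Int.bitLength poly : Int) - 1
  let shift : Int := data_bits - 1
  let divisor : Int := poly <<< shift.toNat
  let dividendo : Int := (PySem.List.pyRange 0 data_bits 1).foldl
    (fun dividendo i =>
      if PySem.Int.band (dividendo >>> (data_bits + degree - 1 - i).toNat) 1 ≠ 0 then
        PySem.Int.bxor dividendo (divisor >>> i.toNat)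
      else dividendo) datos_con_crc
  PySem.Int.band dividendo ((1 <<< degree.toNat) - 1) == 0

-- ===== PORT B =====
def verificar_crc_alt (datos_con_crc : Int) (poly : Int) (data_bits : Int) : Bool :=
  let degree : Int := (PySem.Int.bitLength poly : Int) - 1
  let mask : Int := (1 <<< degree.toNat) - 1
  let rem0 : Int := PySem.Int.band (datos_con_crc >>> data_bits.toNat) mask
  let rem : Int := (PySem.List.pyRange (data_bits - 1) (-1) (-1)).foldl
    (fun (rem : Int) (p : Int) =>
      let r := PySem.Int.bor (rem <<< 1) (PySem.Int.band (datos_con_crc >>> p.toNat) 1)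
      let r := if PySem.Int.band (r >>> degree.toNat) 1 ≠ 0 then PySem.Int.bxor r poly else r
      PySem.Int.band r mask) rem0
  rem == 0

-- ===== PRECONDITION & SPEC =====
-- Pre excludes exactly the inputs where Python A raises: poly = 0 (negative shift amount
-- 'dividendo >> -1' via degree = -1) and data_bits ≤ 0 ('poly << (data_bits - 1)' with a
-- negative shift raises ValueError).
def Pre_verificar_crc (datos_con_crc : Int) (poly : Int) (data_bits : Int) : Prop :=
  poly ≠ 0 ∧ 1 ≤ data_bits
instance (datos_con_crc : Int) (poly : Int) (data_bits : Int) : Decidable (Pre_verificar_crc datos_con_crc poly data_bits) := by unfold Pre_verificar_crc; infer_instance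

def pvWitness_verificar_crc : Int × Int × Int := (350, 263, 8)

-- When data_bits = 0 (and poly ≠ 0) A raises ValueError (negative shift), while B returns
-- whether the degree-wide field of the packet is zero as a remainder, i.e. rem == 0.
def Raises_verificar_crc (datos_con_crc : Int) (poly : Int) (data_bits : Int) : Prop :=
  poly ≠ 0 ∧ data_bits = 0
instance (datos_con_crc : Int) (poly : Int) (data_bits : Int) : Decidable (Raises_verificar_crc datos_con_crc poly data_bits) := by unfold Raises_verificar_crc; infer_instance
def pvRaiseWitness_verificar_crc : Int × Int × Int := (5, 7, 0)
def pvRaiseWitnessOut_verificar_crc : Bool := false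

def Spec_verificar_crc (datos_con_crc : Int) (poly : Int) (data_bits : Int) (out : Bool) : Prop := out = verificar_crc_alt datos_con_crc poly data_bits
instance (datos_con_crc : Int) (poly : Int) (data_bits : Int) (out : Bool) : Decidable (Spec_verificar_crc datos_con_crc poly data_bits out) := by unfold Spec_verificar_crc; infer_instance

-- ===== CLAIM (what is proved, stated in full; the proofs are below) =====
def Claim_equal_verificar_crc : Prop := ∀ (datos_con_crc : Int) (poly : Int) (data_bits : Int), Dom_verificar_crc datos_con_crc poly data_bits → Pre_verificar_crc datos_con_crc poly data_bits → Spec_verificar_crc datos_con_crc poly data_bits (verificar_crc datos_con_crc poly data_bits)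

def Claim_raises_verificar_crc : Prop := (∀ (datos_con_crc : Int) (poly : Int) (data_bits : Int), Dom_verificar_crc datos_con_crc poly data_bits → Raises_verificar_crc datos_con_crc poly data_bits → ¬ Pre_verificar_crc datos_con_crc poly data_bits) ∧ (Dom_verificar_crc (pvRaiseWitness_verificar_crc.1) (pvRaiseWitness_verificar_crc.2.1) (pvRaiseWitness_verificar_crc.2.2) ∧ Raises_verificar_crc (pvRaiseWitness_verificar_crc.1) (pvRaiseWitness_verificar_crc.2.1) (pvRaiseWitness_verificar_crc.2.2) ∧ verificar_crc_alt (pvRaiseWitness_verificar_crc.1) (pvRaiseWitness_verificar_crc.2.1) (pvRaiseWitness_verificar_crc.2.2) = pvRaiseWitnessOut_verificar_crc)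

-- ===== LEMMAS AND PROOFS =====

theorem pvNatTwoMulOrOne (m : ℕ) : 2 * m ||| 1 = 2 * m + 1 := by
  apply Nat.eq_of_testBit_eq
  intro i
  cases i with
  | zero => simp [Nat.testBit_zero]
  | succ i =>
      rw [Nat.testBit_lor, Nat.testBit_succ, Nat.testBit_succ, Nat.testBit_succ]
      have h1 : 2 * m / 2 = m := by omega
      have h2 : (2 * m + 1) / 2 = m := by omega
      have h3 : 1 / 2 = 0 := by omega
      simp [h1, h2, h3]

-- Int-level parity and halving of Python xor
theorem pvBxorEmodTwo (a b : ℤ) : PySem.Int.bxor a b % 2 = (a + b) % 2 := by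
  unfold PySem.Int.bxor
  rcases (by omega : 0 ≤ a ∨ a < 0) with ha | ha <;> rcases (by omega : 0 ≤ b ∨ b < 0) with hb | hb
  · rw [if_pos ha, if_pos hb]
    have h := @Nat.xor_mod_two_eq a.toNat b.toNat
    generalize a.toNat ^^^ b.toNat = k at h ⊢; omega
  · rw [if_pos ha, if_neg (by omega : ¬ (0:ℤ) ≤ b)]
    have h := @Nat.xor_mod_two_eq a.toNat (-b-1).toNat
    generalize a.toNat ^^^ (-b-1).toNat = k at h ⊢; omega
  · rw [if_neg (by omega : ¬ (0:ℤ) ≤ a), if_pos hb]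
    have h := @Nat.xor_mod_two_eq (-a-1).toNat b.toNat
    generalize (-a-1).toNat ^^^ b.toNat = k at h ⊢; omega
  · rw [if_neg (by omega : ¬ (0:ℤ) ≤ a), if_neg (by omega : ¬ (0:ℤ) ≤ b)]
    have h := @Nat.xor_mod_two_eq (-a-1).toNat (-b-1).toNat
    generalize (-a-1).toNat ^^^ (-b-1).toNat = k at h ⊢; omega

theorem pvBxorEdivTwo (a b : ℤ) : PySem.Int.bxor a b / 2 = PySem.Int.bxor (a / 2) (b / 2) := by
  unfold PySem.Int.bxor
  rcases (by omega : 0 ≤ a ∨ a < 0) with ha | ha <;> rcases (by omega : 0 ≤ b ∨ b < 0) with hb | hb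
  · rw [if_pos ha, if_pos hb, if_pos (by omega : (0:ℤ) ≤ a/2), if_pos (by omega : (0:ℤ) ≤ b/2)]
    have e1 : (a/2).toNat = a.toNat / 2 := by omega
    have e2 : (b/2).toNat = b.toNat / 2 := by omega
    rw [e1, e2, ← Nat.xor_div_two]
    generalize a.toNat ^^^ b.toNat = k
    omega
  · rw [if_pos ha, if_neg (by omega : ¬ (0:ℤ) ≤ b), if_pos (by omega : (0:ℤ) ≤ a/2),
        if_neg (by omega : ¬ (0:ℤ) ≤ b/2)]
    have e1 : (a/2).toNat = a.toNat / 2 := by omega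
    have e2 : (-(b/2) - 1).toNat = (-b - 1).toNat / 2 := by omega
    rw [e1, e2, ← Nat.xor_div_two]
    generalize a.toNat ^^^ (-b-1).toNat = k
    omega
  · rw [if_neg (by omega : ¬ (0:ℤ) ≤ a), if_pos hb, if_neg (by omega : ¬ (0:ℤ) ≤ a/2),
        if_pos (by omega : (0:ℤ) ≤ b/2)]
    have e1 : (-(a/2) - 1).toNat = (-a - 1).toNat / 2 := by omega
    have e2 : (b/2).toNat = b.toNat / 2 := by omega
    rw [e1, e2, ← Nat.xor_div_two]
    generalize (-a-1).toNat ^^^ b.toNat = k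
    omega
  · rw [if_neg (by omega : ¬ (0:ℤ) ≤ a), if_neg (by omega : ¬ (0:ℤ) ≤ b),
        if_neg (by omega : ¬ (0:ℤ) ≤ a/2), if_neg (by omega : ¬ (0:ℤ) ≤ b/2)]
    have e1 : (-(a/2) - 1).toNat = (-a - 1).toNat / 2 := by omega
    have e2 : (-(b/2) - 1).toNat = (-b - 1).toNat / 2 := by omega
    rw [e1, e2, ← Nat.xor_div_two]
    generalize (-a-1).toNat ^^^ (-b-1).toNat = k
    omega

-- digit decomposition: x mod 2m splits into parity and shifted part
theorem pvEmodTwoMul (u m : ℤ) (hm : 0 < m) : u % (2 * m) = u % 2 + 2 * ((u / 2) % m) := by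
  have h2 := Int.emod_add_mul_ediv (u / 2) m
  have h3 := Int.emod_nonneg (u / 2) (by omega : m ≠ 0)
  have h4 := Int.emod_lt_of_pos (u / 2) hm
  have key : u = (u % 2 + 2 * ((u / 2) % m)) + (2 * m) * (u / 2 / m) := by
    have h1 : u = 2 * (u / 2) + u % 2 := by omega
    nlinarith [h2]
  calc u % (2*m) = ((u % 2 + 2 * ((u / 2) % m)) + (2 * m) * (u / 2 / m)) % (2*m) := by rw [← key]
  _ = (u % 2 + 2 * ((u / 2) % m)) % (2*m) := Int.add_mul_emod_self_left _ _ _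
  _ = u % 2 + 2 * ((u / 2) % m) := Int.emod_eq_of_lt (by omega) (by omega)

theorem pvEmodTwoMulDiv (u m : ℤ) (hm : 0 < m) : (u % (2 * m)) / m = (u / m) % 2 := by
  have h2 := Int.emod_add_mul_ediv (u / 2) m
  have h3 := Int.emod_nonneg (u / 2) (by omega : m ≠ 0)
  have h4 := Int.emod_lt_of_pos (u / 2) hm
  have hsplit := pvEmodTwoMul u m hm
  set r2 := (u / 2) % m with hr2
  have hd : (u % 2 + 2 * r2) / m = if 2 * r2 + u % 2 < m then 0 else 1 := by
    split_ifs with hlt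
    · exact Int.ediv_eq_zero_of_lt (by omega) (by omega)
    · have : u % 2 + 2 * r2 = (u % 2 + 2 * r2 - m) + m * 1 := by ring
      rw [this, Int.add_mul_ediv_left _ _ (by omega : m ≠ 0),
          Int.ediv_eq_zero_of_lt (by omega) (by omega)]
      omega
  have hq : u / m = (u % (2*m)) / m + 2 * (u / (2*m)) := by
    have h5 := Int.emod_add_mul_ediv u (2*m)
    have : u = (u % (2*m)) + m * (2 * (u / (2*m))) := by nlinarith [h5]
    calc u / m = ((u % (2*m)) + m * (2 * (u / (2*m)))) / m := by rw [← this]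
    _ = (u % (2*m)) / m + 2 * (u / (2*m)) := Int.add_mul_ediv_left _ _ (by omega)
  have hs : (u % (2*m)) / m = 0 ∨ (u % (2*m)) / m = 1 := by
    rw [hsplit, hd]; split_ifs <;> omega
  omega

-- xor distributes over shifting right
theorem pvBxorEdivPow (k : ℕ) (a b : ℤ) :
    PySem.Int.bxor a b / 2 ^ k = PySem.Int.bxor (a / 2 ^ k) (b / 2 ^ k) := by
  induction k generalizing a b with
  | zero => simp
  | succ k ih =>
      have h : ∀ x : ℤ, x / 2 ^ (k+1) = (x / 2) / 2 ^ k := by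
        intro x
        rw [pow_succ', ← Int.ediv_ediv_of_nonneg (by norm_num : (0:ℤ) ≤ 2)]
      rw [h, h a, h b, pvBxorEdivTwo, ih]

-- low k bits of an xor depend only on the low k bits of each argument
theorem pvBxorAddMulPowEmod (k : ℕ) (a b c : ℤ) :
    PySem.Int.bxor (a + c * 2 ^ k) b % 2 ^ k = PySem.Int.bxor a b % 2 ^ k := by
  induction k generalizing a b c with
  | zero => simp
  | succ k ih =>
      have hm : (0:ℤ) < 2 ^ k := by positivity
      have hsp : ∀ x : ℤ, x % 2 ^ (k+1) = x % 2 + 2 * ((x / 2) % 2 ^ k) := by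
        intro x; rw [pow_succ', pvEmodTwoMul _ _ hm]
      rw [hsp, hsp]
      have hpar : PySem.Int.bxor (a + c * 2 ^ (k+1)) b % 2 =
          PySem.Int.bxor a b % 2 := by
        rw [pvBxorEmodTwo, pvBxorEmodTwo, pow_succ']
        have : a + c * (2 * 2 ^ k) + b = (a + b) + 2 * (c * 2 ^ k) := by ring
        rw [this, Int.add_mul_emod_self_left]
      have hdiv : PySem.Int.bxor (a + c * 2 ^ (k+1)) b / 2 % 2 ^ k =
          PySem.Int.bxor a b / 2 % 2 ^ k := by
        rw [pvBxorEdivTwo, pvBxorEdivTwo]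
        have : (a + c * 2 ^ (k+1)) / 2 = a / 2 + c * 2 ^ k := by
          rw [pow_succ']
          have : a + c * (2 * 2 ^ k) = a + 2 * (c * 2 ^ k) := by ring
          rw [this, Int.add_mul_ediv_left _ _ (by norm_num : (2:ℤ) ≠ 0)]
        rw [this, ih]
      omega

-- xoring a multiple of 2^k does not change the low k bits
theorem pvBxorMulPowEmod (k : ℕ) (a c : ℤ) :
    PySem.Int.bxor a (c * 2 ^ k) % 2 ^ k = a % 2 ^ k := by
  rw [PySem.Int.bxor_comm]
  have h := pvBxorAddMulPowEmod k 0 a c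
  rw [zero_add] at h
  rw [h, PySem.Int.bxor_comm, PySem.Int.bxor_zero]

-- band with an all-ones mask is emod
theorem pvBandMask (a : ℤ) (k : ℕ) : PySem.Int.band a (2 ^ k - 1) = a % 2 ^ k := by
  have hcast : ((2 ^ k : ℕ) : ℤ) = 2 ^ k := by push_cast; ring
  have hk : (1:ℤ) ≤ 2 ^ k := by
    have := Nat.one_le_two_pow (n := k); omega
  have hkn : ((2 ^ k - 1 : ℤ)).toNat = 2 ^ k - 1 := by omega
  unfold PySem.Int.band
  rcases (by omega : 0 ≤ a ∨ a < 0) with ha | ha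
  · rw [if_pos ha, if_pos (by omega : (0:ℤ) ≤ 2 ^ k - 1), hkn,
        Nat.and_two_pow_sub_one_eq_mod]
    have h4 : ((a.toNat % 2 ^ k : ℕ) : ℤ) = (a.toNat : ℤ) % ((2 ^ k : ℕ) : ℤ) := by
      push_cast; ring
    rw [h4, hcast]
    congr 1
    omega
  · rw [if_neg (by omega : ¬ (0:ℤ) ≤ a), if_pos (by omega : (0:ℤ) ≤ 2 ^ k - 1), hkn,
        Nat.and_comm, Nat.and_two_pow_sub_one_eq_mod]
    set t := (-a - 1).toNat with ht
    have h2 := Nat.mod_lt t (show 0 < 2^k from by positivity)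
    have h5 := Nat.mod_add_div t (2 ^ k)
    set q := t / 2 ^ k with hq
    set r := t % 2 ^ k with hr
    have h5Z : (t : ℤ) = (r : ℤ) + 2 ^ k * q := by
      have := congrArg (fun n : ℕ => (n : ℤ)) h5
      push_cast at this
      linarith
    have haZ : a = -(t:ℤ) - 1 := by omega
    have hrep : a = ((2:ℤ) ^ k - 1 - r) + 2 ^ k * (-(q:ℤ) - 1) := by
      rw [haZ, h5Z]; ring
    calc ((2 ^ k - 1 - (t % 2 ^ k) : ℕ) : ℤ) = (2:ℤ) ^ k - 1 - r := by omega
    _ = ((2:ℤ) ^ k - 1 - r + 2 ^ k * (-(q:ℤ) - 1)) % 2 ^ k := by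
        rw [Int.add_mul_emod_self_left, Int.emod_eq_of_lt (by omega) (by omega)]
    _ = a % 2 ^ k := by rw [← hrep]

-- the truthiness test `(e) & 1 != 0` is `e % 2 = 1`
theorem pvBandOneNe (e : ℤ) : (PySem.Int.band e 1 ≠ 0) ↔ e % 2 = 1 := by
  rw [PySem.Int.band_one, PySem.Int.mod_eq_emod_of_pos (by norm_num)]
  omega

-- bor of a shifted value with a single bit is addition
theorem pvBorBit (r b : ℤ) (hr : 0 ≤ r) (hb0 : 0 ≤ b) (hb1 : b < 2) :
    PySem.Int.bor (r <<< 1) b = 2 * r + b := by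
  have hs : r <<< (1:ℤ) = 2 * r := by
    have h := Int.shiftLeft_eq_mul_pow r 1
    push_cast at h
    rw [h]; ring
  rcases (by omega : b = 0 ∨ b = 1) with hb | hb <;> subst hb
  · rw [PySem.Int.bor_zero, hs]; ring
  · rw [PySem.Int.bor_of_nonneg (by omega) (by norm_num), hs]
    have h1 : (2 * r).toNat = 2 * r.toNat := by omega
    rw [h1, show ((1:ℤ)).toNat = 1 from rfl, pvNatTwoMulOrOne]
    omega

theorem pvBitLengthPos (p : ℤ) (hp : p ≠ 0) : 1 ≤ PySem.Int.bitLength p := by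
  by_contra h
  have h0 : PySem.Int.bitLength p = 0 := by omega
  have := PySem.Int.lt_two_pow_bitLength p
  rw [h0] at this
  simp at this
  exact hp (by omega)

-- A's loop, one step per remaining count n (tests bit n+d, xors P·2^n)
def pvGoA (P : ℤ) (d : ℕ) : ℕ → ℤ → ℤ
  | 0, div => div
  | n + 1, div =>
      pvGoA P d n (if (div / 2 ^ (n + d)) % 2 = 1 then PySem.Int.bxor div (P * 2 ^ n) else div)

-- B's loop, one step per remaining count n (consumes bit n of x)
def pvGoB (x P : ℤ) (d : ℕ) : ℕ → ℤ → ℤ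
  | 0, rem => rem
  | n + 1, rem =>
      let r := 2 * rem + (x / 2 ^ n) % 2
      pvGoB x P d n ((if (r / 2 ^ d) % 2 = 1 then PySem.Int.bxor r P else r) % 2 ^ d)

-- the invariant: B's shift register is the degree-wide window of A's dividend
theorem pvInv (x P : ℤ) (d : ℕ) :
    ∀ n : ℕ, ∀ div rem : ℤ,
      div % 2 ^ n = x % 2 ^ n →
      rem = (div / 2 ^ n) % 2 ^ d →
      pvGoB x P d n rem = pvGoA P d n div % 2 ^ d := by
  intro n
  induction n with
  | zero => intro div rem h1 h2; simpa [pvGoA, pvGoB] using h2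
  | succ n ih =>
      intro div rem h1 h2
      have hMpos : (0:ℤ) < 2 ^ d := by positivity
      have hNpos : (0:ℤ) < 2 ^ n := by positivity
      set u : ℤ := div / 2 ^ n with hu
      have hps : (2:ℤ) ^ (n+1) = 2 * 2 ^ n := by rw [pow_succ]; ring
      have hdd : ∀ w : ℤ, w / 2 ^ (n+1) = (w / 2 ^ n) / 2 := by
        intro w
        rw [hps, mul_comm, ← Int.ediv_ediv_of_nonneg (by positivity : (0:ℤ) ≤ 2 ^ n)]
      have hbit : (x / 2 ^ n) % 2 = u % 2 := by
        have e1 : (div % 2 ^ (n+1)) / 2 ^ n = (div / 2 ^ n) % 2 := by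
          rw [hps]; exact pvEmodTwoMulDiv div (2 ^ n) hNpos
        have e2 : (x % 2 ^ (n+1)) / 2 ^ n = (x / 2 ^ n) % 2 := by
          rw [hps]; exact pvEmodTwoMulDiv x (2 ^ n) hNpos
        rw [← e2, ← h1, e1]
      have hrem : rem = (u / 2) % 2 ^ d := by rw [h2, hdd div]
      have hr : 2 * rem + (x / 2 ^ n) % 2 = u % (2 * 2 ^ d) := by
        rw [hbit, hrem, pvEmodTwoMul u (2 ^ d) hMpos]; ring
      have hcond : ((2 * rem + (x / 2 ^ n) % 2) / 2 ^ d) % 2 = (div / 2 ^ (n + d)) % 2 := by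
        rw [hr, pvEmodTwoMulDiv u (2 ^ d) hMpos]
        have : div / 2 ^ (n + d) = u / 2 ^ d := by
          rw [hu, Int.ediv_ediv_of_nonneg (by positivity : (0:ℤ) ≤ 2 ^ n), ← pow_add]
        rw [this, Int.emod_emod_of_dvd _ dvd_rfl]
      have hlow : div % 2 ^ n = x % 2 ^ n := by
        have d1 : div % 2 ^ (n+1) % 2 ^ n = div % 2 ^ n :=
          Int.emod_emod_of_dvd _ ⟨2, by rw [hps]; ring⟩
        have d2 : x % 2 ^ (n+1) % 2 ^ n = x % 2 ^ n :=
          Int.emod_emod_of_dvd _ ⟨2, by rw [hps]; ring⟩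
        rw [← d1, h1, d2]
      show pvGoB x P d (n+1) rem = pvGoA P d (n+1) div % 2 ^ d
      rw [pvGoB, pvGoA]
      by_cases hc : (div / 2 ^ (n + d)) % 2 = 1
      · rw [if_pos (by rw [hcond]; exact hc), if_pos hc]
        apply ih
        · rw [pvBxorMulPowEmod n div P, hlow]
        · rw [pvBxorEdivPow n, Int.mul_ediv_cancel _ (by positivity : (2:ℤ) ^ n ≠ 0), ← hu]
          rw [hr]
          have hrep : u % (2 * 2 ^ d) = u + (-(2 * (u / (2 * 2 ^ d)))) * 2 ^ d := by
            have := Int.emod_add_mul_ediv u (2 * 2 ^ d)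
            ring_nf
            ring_nf at this
            linarith
          rw [hrep, pvBxorAddMulPowEmod]
      · rw [if_neg (by rw [hcond]; exact hc), if_neg hc]
        apply ih
        · exact hlow
        · rw [hr, ← hu, Int.emod_emod_of_dvd _ ⟨2, by ring⟩]

-- bridge: A's fold is pvGoA
theorem pvBridgeA (P : ℤ) (d N : ℕ) (hN : 1 ≤ N) (degI divI : ℤ)
    (hdeg : degI = (d : ℤ)) (hdiv : divI = P <<< (((N : ℤ) - 1)).toNat) :
    ∀ n : ℕ, n ≤ N → ∀ div : ℤ,
      (PySem.List.pyRange ((N : ℤ) - (n : ℤ)) ((N : ℤ)) 1).foldl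
        (fun (dividendo : ℤ) (i : ℤ) =>
          if PySem.Int.band (dividendo >>> (((N : ℤ) + degI - 1 - i).toNat)) 1 ≠ 0 then
            PySem.Int.bxor dividendo (divI >>> i.toNat)
          else dividendo) div
      = pvGoA P d n div := by
  intro n
  induction n with
  | zero =>
      intro _ div
      rw [show ((N : ℤ) - ((0:ℕ) : ℤ)) = (N : ℤ) by push_cast; ring,
          PySem.List.pyRange_one_eq_nil le_rfl]
      rfl
  | succ n ih =>
      intro hn div
      rw [PySem.List.pyRange_one_cons (by omega : ((N : ℤ) - ((n+1 : ℕ) : ℤ)) < (N : ℤ)),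
          List.foldl_cons,
          show ((N : ℤ) - ((n+1 : ℕ) : ℤ)) + 1 = (N : ℤ) - ((n : ℕ) : ℤ) by push_cast; ring,
          ih (by omega)]
      show pvGoA P d n _ = pvGoA P d (n+1) div
      rw [pvGoA]
      congr 1
      have he : (((N : ℤ) + degI - 1 - ((N : ℤ) - ((n+1 : ℕ) : ℤ)))).toNat = n + d := by
        rw [hdeg]; omega
      have hx : divI >>> (((N : ℤ) - ((n+1 : ℕ) : ℤ))).toNat = P * 2 ^ n := by
        rw [hdiv, Int.shiftLeft_eq,
            show (((N : ℤ) - 1)).toNat = n + (N - n - 1) by omega,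
            show (((N : ℤ) - ((n+1 : ℕ) : ℤ))).toNat = N - n - 1 by omega,
            Int.shiftRight_eq_div_pow, pow_add, ← mul_assoc]
        push_cast
        exact Int.mul_ediv_cancel _ (by positivity)
      rw [he, hx, Int.shiftRight_eq_div_pow,
          show ((2 ^ (n + d) : ℕ) : ℤ) = 2 ^ (n + d) by push_cast; ring]
      by_cases hc : (div / 2 ^ (n + d)) % 2 = 1
      · rw [if_pos ((pvBandOneNe _).mpr hc), if_pos hc]
      · rw [if_neg (fun hh => hc ((pvBandOneNe _).mp hh)), if_neg hc]

-- bridge: B's fold is pvGoB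
theorem pvBridgeB (x P : ℤ) (d : ℕ) (degI maskI : ℤ)
    (hdeg : degI = (d : ℤ)) (hmask : maskI = 2 ^ d - 1) :
    ∀ n : ℕ, ∀ rem : ℤ, 0 ≤ rem →
      (PySem.List.pyRange ((n : ℤ) - 1) (-1) (-1)).foldl
        (fun (rem : ℤ) (p : ℤ) =>
          PySem.Int.band
            (if PySem.Int.band
                  ((PySem.Int.bor (rem <<< 1) (PySem.Int.band (x >>> p.toNat) 1)) >>> degI.toNat) 1 ≠ 0 then
              PySem.Int.bxor (PySem.Int.bor (rem <<< 1) (PySem.Int.band (x >>> p.toNat) 1)) P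
            else PySem.Int.bor (rem <<< 1) (PySem.Int.band (x >>> p.toNat) 1))
            maskI) rem
      = pvGoB x P d n rem := by
  intro n
  induction n with
  | zero =>
      intro rem _
      rw [show (((0:ℕ) : ℤ) - 1) = (-1 : ℤ) by norm_num,
          PySem.List.pyRange_neg_one_eq_nil le_rfl]
      rfl
  | succ n ih =>
      intro rem hrem
      rw [PySem.List.pyRange_neg_one_cons (by omega : (-1 : ℤ) < ((n+1 : ℕ) : ℤ) - 1),
          List.foldl_cons,
          show (((n+1 : ℕ) : ℤ) - 1) - 1 = ((n : ℕ) : ℤ) - 1 by push_cast; ring]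
      have hbit : PySem.Int.band (x >>> ((((n+1 : ℕ) : ℤ) - 1)).toNat) 1 = (x / 2 ^ n) % 2 := by
        rw [PySem.Int.band_one, PySem.Int.mod_eq_emod_of_pos (by norm_num),
            show ((((n+1 : ℕ) : ℤ) - 1)).toNat = n by omega, Int.shiftRight_eq_div_pow]
        push_cast; ring_nf
      have hb0 : 0 ≤ (x / 2 ^ n) % 2 := Int.emod_nonneg _ (by norm_num)
      have hb1 : (x / 2 ^ n) % 2 < 2 := Int.emod_lt_of_pos _ (by norm_num)
      rw [hbit, pvBorBit rem _ hrem hb0 hb1]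
      set r : ℤ := 2 * rem + (x / 2 ^ n) % 2 with hrdef
      have hcnd : (PySem.Int.band (r >>> degI.toNat) 1 ≠ 0) ↔ (r / 2 ^ d) % 2 = 1 := by
        rw [pvBandOneNe, hdeg, show ((d : ℤ)).toNat = d by omega, Int.shiftRight_eq_div_pow]
        push_cast; rfl
      have hnext : PySem.Int.band (if (r / 2 ^ d) % 2 = 1 then PySem.Int.bxor r P else r) maskI
          = (if (r / 2 ^ d) % 2 = 1 then PySem.Int.bxor r P else r) % 2 ^ d := by
        rw [hmask, pvBandMask]
      by_cases hc : (r / 2 ^ d) % 2 = 1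
      · rw [if_pos (hcnd.mpr hc)] at *
        rw [if_pos hc] at hnext
        rw [hnext, ih _ (Int.emod_nonneg _ (by positivity))]
        rw [pvGoB]
        simp only [← hrdef, if_pos hc]
      · rw [if_neg (fun hh => hc (hcnd.mp hh))]
        rw [if_neg hc] at hnext
        rw [hnext, ih _ (Int.emod_nonneg _ (by positivity))]
        rw [pvGoB]
        simp only [← hrdef, if_neg hc]

-- ===== VERDICT (by name: the statement is the Claim_ definition above) =====

theorem verificar_crc_spec : Claim_equal_verificar_crc := by
  intro datos poly data_bits hDom hPre
  obtain ⟨hp, hdb⟩ := hPre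
  unfold Spec_verificar_crc verificar_crc verificar_crc_alt
  set N : ℕ := data_bits.toNat with hNdef
  have hNeq : data_bits = (N : ℤ) := by omega
  have hN1 : 1 ≤ N := by omega
  have hbl := pvBitLengthPos poly hp
  set d : ℕ := PySem.Int.bitLength poly - 1 with hddef
  have hdeg : ((PySem.Int.bitLength poly : ℤ) - 1) = (d : ℤ) := by omega
  have hdt : (((PySem.Int.bitLength poly : ℤ) - 1)).toNat = d := by omega
  have hmask : (((1 <<< (((PySem.Int.bitLength poly : ℤ) - 1)).toNat : ℕ)) : ℤ) - 1 = 2 ^ d - 1 := by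
    rw [hdt, Nat.one_shiftLeft]; push_cast; ring
  rw [hNeq]
  simp only [hmask]
  have bA := pvBridgeA poly d N hN1 ((PySem.Int.bitLength poly : ℤ) - 1)
      (poly <<< ((((N : ℤ)) - 1)).toNat) hdeg rfl N le_rfl datos
  rw [show ((N : ℤ) - ((N : ℕ) : ℤ)) = 0 by ring] at bA
  have bB := pvBridgeB datos poly d ((PySem.Int.bitLength poly : ℤ) - 1)
      ((2:ℤ) ^ d - 1) hdeg rfl N
  rw [bA]
  have hrem0 : PySem.Int.band (datos >>> N) ((2:ℤ) ^ d - 1)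
      = (datos / 2 ^ N) % 2 ^ d := by
    rw [pvBandMask, Int.shiftRight_eq_div_pow,
        show ((2 ^ N : ℕ) : ℤ) = 2 ^ N by push_cast; ring]
  rw [hrem0, bB _ (Int.emod_nonneg _ (by positivity))]
  rw [pvInv datos poly d N datos _ rfl rfl]
  rw [pvBandMask]

theorem verificar_crc_raises : Claim_raises_verificar_crc := by
  unfold Claim_raises_verificar_crc
  exact ⟨by intro _ _ n _ hr hp; exact absurd hp.2 (by rw [hr.2]; decide), by decide⟩

-- self-check (kept deliberately): the raise region really lies outside Pre_
theorem pvRaisesOutsidePre_ok (a p n : ℤ) (hD : Dom_verificar_crc a p n)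
    (hR : Raises_verificar_crc a p n) : ¬ Pre_verificar_crc a p n :=
  verificar_crc_raises.1 a p n hD hR
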